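-- pv_equiv track=rewrite | github.com/KadeerCanada/MeCab-Chinese | train/v0.2/script/make_mecab_seed_data.py | make_word_4tag
-- ===== SOURCE A (Python) =====
-- def make_word_4tag(word):
--     if len(word) == 0:
--         return "N"
--     if len(word) == 1:
--         return "S"
--     else:
--         tag = "B"
--         for w in word[1:len(word)-1]:
--             tag += "M"
--         tag += "E"
--         return tag
-- ===== SOURCE B (Python) =====
-- def make_word_4tag(word):
--     if len(word) == 0:
--         return "N"
--     if len(word) == 1:
--         return "S"
--     return "B" + "M" * (len(word) - 2) + "E"
-- ===== Notes on version B (the rewrite author's own statement) =====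
-- stated objective: simpler
-- what changed: Replaces the tag-accumulation loop with a single closed-form string expression that builds the middle run by repetition (len(word)-2 copies) between the begin and end tags.
import Mathlib
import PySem

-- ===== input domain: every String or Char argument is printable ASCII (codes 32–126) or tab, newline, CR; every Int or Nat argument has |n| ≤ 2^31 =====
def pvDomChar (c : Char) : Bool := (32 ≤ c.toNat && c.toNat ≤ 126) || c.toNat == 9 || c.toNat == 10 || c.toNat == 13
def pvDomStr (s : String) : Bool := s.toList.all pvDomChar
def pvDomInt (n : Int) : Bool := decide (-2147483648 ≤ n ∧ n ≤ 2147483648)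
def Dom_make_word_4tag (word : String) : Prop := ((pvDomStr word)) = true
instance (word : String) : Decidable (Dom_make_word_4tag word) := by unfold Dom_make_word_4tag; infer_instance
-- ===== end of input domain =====

-- B replaces A's accumulation loop with a closed-form "B" + "M"*(n-2) + "E" string construction (simpler).

-- ===== PORT A =====
def make_word_4tag (word : String) : String :=
  if PySem.Str.len word = 0 then "N"
  else if PySem.Str.len word = 1 then "S"
  else
    -- tag = "B"; for w in word[1:len(word)-1]: tag += "M"; tag += "E"
    let mid := PySem.List.slice word.toList (some 1) (some (PySem.Str.len word - 1))
    let tag := mid.foldl (fun tag _ => tag ++ ['M']) ['B']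
    String.ofList (tag ++ ['E'])

-- ===== PORT B =====
def make_word_4tag_alt (word : String) : String :=
  if PySem.Str.len word = 0 then "N"
  else if PySem.Str.len word = 1 then "S"
  else
    -- "B" + "M" * (len(word) - 2) + "E"  (str * n ported as List.replicate)
    String.ofList ('B' :: (List.replicate (PySem.Str.len word - 2).toNat 'M' ++ ['E']))

-- ===== PRECONDITION & SPEC =====
def Spec_make_word_4tag (word : String) (out : String) : Prop := out = make_word_4tag_alt word
instance (word : String) (out : String) : Decidable (Spec_make_word_4tag word out) := by unfold Spec_make_word_4tag; infer_instance

-- ===== CLAIM (what is proved, stated in full; the proofs are below) =====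
def Claim_equal_make_word_4tag : Prop := ∀ (word : String), Dom_make_word_4tag word → Spec_make_word_4tag word (make_word_4tag word)

-- ===== LEMMAS AND PROOFS =====

theorem foldl_M_replicate {α : Type} (l : List α) (acc : List Char) :
    l.foldl (fun tag _ => tag ++ ['M']) acc = acc ++ List.replicate l.length 'M' := by
  induction l generalizing acc with
  | nil => simp
  | cons x xs ih =>
      rw [List.foldl_cons, ih, List.append_assoc]
      simp [List.replicate_succ]

-- ===== VERDICT (by name: the statement is the Claim_ definition above) =====
theorem make_word_4tag_spec : Claim_equal_make_word_4tag := by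
  intro word _
  unfold Spec_make_word_4tag make_word_4tag make_word_4tag_alt
  by_cases h0 : PySem.Str.len word = 0
  · rw [if_pos h0, if_pos h0]
  · by_cases h1 : PySem.Str.len word = 1
    · rw [if_neg h0, if_neg h0, if_pos h1, if_pos h1]
    · rw [if_neg h0, if_neg h0, if_neg h1, if_neg h1]
      have hlen : PySem.Str.len word = (word.toList.length : Int) := by
        simp [PySem.Str.len_eq]
      have h2 : 2 ≤ word.toList.length := by
        omega
      have hslice : PySem.List.slice word.toList (some 1) (some (PySem.Str.len word - 1))
          = (word.toList.drop 1).take ((PySem.Str.len word - 1).toNat - 1) := by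
        apply PySem.List.slice_of_nonneg <;> omega
      simp only [hslice, foldl_M_replicate]
      congr 2
      have hlen2 : ((word.toList.drop 1).take ((PySem.Str.len word - 1).toNat - 1)).length
          = word.toList.length - 2 := by
        simp [List.length_take]
        omega
      rw [hlen2]
      have : (PySem.Str.len word - 2).toNat = word.toList.length - 2 := by omega
      rw [this]
      simp
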